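-- pv_equiv track=rewrite | github.com/abhishekir/CodingBat_Solutions | src/Array_2.py | modThree
-- ===== SOURCE A (Python) =====
-- def modThree(nums):
--     if len(nums) < 3:
--         return False
--     else:
--         for i in range(len(nums)-2):
--             if nums[i] % 2 == nums[i+1] % 2 == nums[i+2] % 2:
--                 return True
--         return False
-- ===== SOURCE B (Python) =====
-- def modThree(nums):
--     # single pass with a run-length counter of same-parity elements
--     count = 1
--     prev = None
--     for x in nums:
--         p = x % 2
--         if p == prev:
--             count += 1
--             if count == 3:
--                 return True
--         else:
--             count = 1
--         prev = p
--     return False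
-- ===== Notes on version B (the rewrite author's own statement) =====
-- stated objective: alternative
-- what changed: Replaced the indexed scan that re-checks an explicit triple nums[i],nums[i+1],nums[i+2] at every position (and its len<3 guard) with a single pass over the elements maintaining the previous parity and a run-length counter, returning True as soon as a run reaches 3.
import Mathlib
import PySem

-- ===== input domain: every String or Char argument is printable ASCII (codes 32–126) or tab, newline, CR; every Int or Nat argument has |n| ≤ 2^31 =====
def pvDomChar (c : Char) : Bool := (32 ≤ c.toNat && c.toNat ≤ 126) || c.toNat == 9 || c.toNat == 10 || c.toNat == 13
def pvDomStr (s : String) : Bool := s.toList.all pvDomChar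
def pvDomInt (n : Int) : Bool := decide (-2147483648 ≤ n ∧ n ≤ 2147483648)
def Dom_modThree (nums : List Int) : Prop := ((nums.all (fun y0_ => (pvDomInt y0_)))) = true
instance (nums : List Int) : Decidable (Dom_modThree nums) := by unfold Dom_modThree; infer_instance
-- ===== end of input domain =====

-- B replaces A's indexed scan over explicit triples with a single pass keeping the previous
-- parity and a run-length counter (objective: alternative decomposition, same cost).

-- ===== PORT A =====
-- the triple check at index i (loop indices are always in range, so pyGetD's default is never read)
def chkA (nums : List Int) (i : Int) : Bool :=
  (PySem.Int.mod (PySem.List.pyGetD nums i 0) 2 == PySem.Int.mod (PySem.List.pyGetD nums (i+1) 0) 2)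
    && (PySem.Int.mod (PySem.List.pyGetD nums (i+1) 0) 2 == PySem.Int.mod (PySem.List.pyGetD nums (i+2) 0) 2)

-- 'for i in range(len(nums)-2): if …: return True / return False' = any over the range
def modThree (nums : List Int) : Bool :=
  if PySem.List.len nums < 3 then false
  else (PySem.List.pyRange 0 (PySem.List.len nums - 2) 1).any (fun i => chkA nums i)

-- ===== PORT B =====
-- the loop body of Source B: prev is None initially (Option Int), count is the current run length
def bgo : List Int → Option Int → Int → Bool
  | [], _, _ => false
  | y :: ys, prev, count =>
    let p := PySem.Int.mod y 2
    if (some p : Option Int) == prev then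
      (if count + 1 == 3 then true else bgo ys (some p) (count + 1))
    else bgo ys (some p) 1

def modThree_alt (nums : List Int) : Bool := bgo nums none 1

-- ===== PRECONDITION & SPEC =====
def Spec_modThree (nums : List Int) (out : Bool) : Prop := out = modThree_alt nums
instance (nums : List Int) (out : Bool) : Decidable (Spec_modThree nums out) := by unfold Spec_modThree; infer_instance

-- ===== CLAIM (what is proved, stated in full; the proofs are below) =====
def Claim_equal_modThree : Prop := ∀ (nums : List Int), Dom_modThree nums → Spec_modThree nums (modThree nums)

-- ===== LEMMAS AND PROOFS =====

-- common reference form: S p xs = "some element of xs starts a same-parity run of 3 in p :: xs"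
def S (p : Int) : List Int → Bool
  | y :: z :: r => ((p == PySem.Int.mod y 2) && (PySem.Int.mod y 2 == PySem.Int.mod z 2)) || S (PySem.Int.mod y 2) (z :: r)
  | _ => false

lemma bgo_cons (y : Int) (ys : List Int) (prev : Option Int) (count : Int) :
    bgo (y :: ys) prev count =
      if (some (PySem.Int.mod y 2) : Option Int) == prev then
        (if count + 1 == 3 then true else bgo ys (some (PySem.Int.mod y 2)) (count + 1))
      else bgo ys (some (PySem.Int.mod y 2)) 1 := rfl

-- with a run of length 2 behind it, bgo fires iff the next parity matches, else it is back in the count=1 state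
lemma bgo_two_or (y : Int) (ys : List Int) (p : Int) :
    bgo (y :: ys) (some p) 2 = ((PySem.Int.mod y 2 == p) || bgo (y :: ys) (some p) 1) := by
  rw [bgo_cons, bgo_cons]
  by_cases h : PySem.Int.mod y 2 = p
  · simp only [h]; simp
  · have hb : ((some (PySem.Int.mod y 2) : Option Int) == some p) = false := by
      simp only [beq_eq_false_iff_ne, ne_eq, Option.some.injEq]; exact h
    have hb2 : (PySem.Int.mod y 2 == p) = false := by
      simp only [beq_eq_false_iff_ne, ne_eq]; exact h
    rw [hb, hb2]; simp

lemma bgo_one_eq_S (xs : List Int) (p : Int) : bgo xs (some p) 1 = S p xs := by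
  induction xs generalizing p with
  | nil => rfl
  | cons y ys ih =>
    cases ys with
    | nil =>
      rw [bgo_cons]
      by_cases h : PySem.Int.mod y 2 = p
      · simp only [h]; simp [S, bgo]
      · have hb : ((some (PySem.Int.mod y 2) : Option Int) == some p) = false := by
          simp only [beq_eq_false_iff_ne, ne_eq, Option.some.injEq]; exact h
        rw [hb]; simp [S, bgo]
    | cons z r =>
      rw [bgo_cons]
      simp only [show ((1:Int)+1) = 2 from rfl]
      rw [bgo_two_or, ih]
      by_cases h : PySem.Int.mod y 2 = p
      · by_cases h2 : PySem.Int.mod z 2 = p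
        · simp only [S, h, h2]; simp
        · simp only [S, h]
          simp [BEq.comm]
      · have hb : ((some (PySem.Int.mod y 2) : Option Int) == some p) = false := by
          simp only [beq_eq_false_iff_ne, ne_eq, Option.some.injEq]; exact h
        have a2 : (p == PySem.Int.mod y 2) = false := by
          simp only [beq_eq_false_iff_ne, ne_eq]; exact fun e => h e.symm
        rw [hb]
        simp only [S, a2]
        simp

lemma chkA_cons_succ (x : Int) (xs : List Int) (k : Nat) :
    chkA (x :: xs) ((k : Int) + 1) = chkA xs k := by
  have h1 : ((k : Int) + 1) = ((k + 1 : Nat) : Int) := by push_cast; ring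
  have h2 : ((k : Int) + 1 + 1) = ((k + 2 : Nat) : Int) := by push_cast; ring
  have h3 : ((k : Int) + 1 + 2) = ((k + 3 : Nat) : Int) := by push_cast; ring
  have h4 : ((k : Int) + 2) = ((k + 2 : Nat) : Int) := by push_cast; ring
  simp only [chkA]
  rw [h3, h2, h1, h4]
  simp only [PySem.List.pyGetD_natCast]
  simp [List.getD, List.getElem?_cons_succ]

lemma chkA_zero (x y z : Int) (r : List Int) :
    chkA (x :: y :: z :: r) 0
      = ((PySem.Int.mod x 2 == PySem.Int.mod y 2) && (PySem.Int.mod y 2 == PySem.Int.mod z 2)) := by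
  simp [chkA, PySem.List.pyGetD_ofNat']

lemma anyA_eq_S (xs : List Int) (x : Int) :
    (PySem.List.pyRange 0 (PySem.List.len (x :: xs) - 2) 1).any (fun i => chkA (x :: xs) i)
      = S (PySem.Int.mod x 2) xs := by
  induction xs generalizing x with
  | nil =>
    rw [PySem.List.pyRange_one_eq_nil (show PySem.List.len (x :: ([] : List Int)) - 2 ≤ 0 by
      simp [PySem.List.len_eq])]
    rfl
  | cons y ys ih =>
    cases ys with
    | nil =>
      have h0 : PySem.List.len (x :: [y]) - 2 = 0 := by simp [PySem.List.len_eq]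
      rw [h0, PySem.List.pyRange_one_eq_nil le_rfl]; rfl
    | cons z r =>
      have hlen : PySem.List.len (x :: y :: z :: r) - 2 = (r.length : Int) + 1 := by
        simp [PySem.List.len_eq]; omega
      have hpos : (0 : Int) < (r.length : Int) + 1 := by positivity
      rw [hlen, PySem.List.pyRange_one_cons hpos]
      simp only [List.any_cons]
      have hshift : (PySem.List.pyRange (0+1) ((r.length : Int) + 1) 1).any (fun i => chkA (x :: y :: z :: r) i)
          = (PySem.List.pyRange 0 (r.length : Int) 1).any (fun i => chkA (y :: z :: r) i) := by
        rw [PySem.List.pyRange_one (0+1), PySem.List.pyRange_one 0]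
        have he : ((r.length : Int) + 1 - (0 + 1)).toNat = ((r.length : Int) - 0).toNat := by omega
        rw [he]
        simp only [List.any_map, Function.comp_def]
        apply PySem.List.any_congr_mem
        intro k _
        have h1 : (0 + 1 + (k : Int)) = (k : Int) + 1 := by ring
        have h2 : (0 + (k : Int)) = (k : Int) := by ring
        rw [h1, h2, chkA_cons_succ]
      rw [hshift]
      have hlen' : (r.length : Int) = PySem.List.len (y :: z :: r) - 2 := by
        simp [PySem.List.len_eq]; omega
      rw [hlen', ih y, chkA_zero]
      simp [S]

lemma A_eq_S (x : Int) (xs : List Int) : modThree (x :: xs) = S (PySem.Int.mod x 2) xs := by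
  rw [← anyA_eq_S xs x]
  unfold modThree
  split
  · rename_i h
    simp only [PySem.List.len_eq] at h
    rcases xs with _ | ⟨y, _ | ⟨z, r⟩⟩
    · rw [PySem.List.pyRange_one_eq_nil (show PySem.List.len (x :: ([] : List Int)) - 2 ≤ 0 by
        simp [PySem.List.len_eq])]
      rfl
    · rw [show PySem.List.len (x :: [y]) - 2 = 0 by simp [PySem.List.len_eq],
          PySem.List.pyRange_one_eq_nil le_rfl]; rfl
    · simp at h; omega
  · rfl

lemma B_eq_S (x : Int) (xs : List Int) : modThree_alt (x :: xs) = S (PySem.Int.mod x 2) xs := by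
  show bgo (x :: xs) none 1 = _
  rw [bgo_cons]
  simp [bgo_one_eq_S]

-- ===== VERDICT (by name: the statement is the Claim_ definition above) =====
theorem modThree_spec : Claim_equal_modThree := by
  intro nums _
  unfold Spec_modThree
  cases nums with
  | nil => rfl
  | cons x xs => rw [A_eq_S, B_eq_S]
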